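-- pv_equiv track=rewrite | github.com/apodgorny/daterange_generator | checker.py | split_formula
-- ===== SOURCE A (Python) =====
-- def split_formula(pre):
-- 	alpha = 'nmN'
-- 	alpha_count1 = 0
-- 	alpha_count2 = 0
-- 	n = 0
--
-- 	for ch in pre:
-- 		if ch in alpha:
-- 			alpha_count1 += 1
--
-- 	if alpha_count1 == 6:
-- 		for ch in pre:
-- 			if ch in alpha:
-- 				alpha_count2 += 1
-- 				if alpha_count2 == 3:
-- 					n += 1
-- 					break
-- 			n += 1
-- 		return pre[:n].strip('/-'), pre[n:].strip('/-')
-- 	return None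
-- ===== SOURCE B (Python) =====
-- def split_formula(pre):
--     first, second = [], []
--     seen = 0
--     for ch in pre:
--         (first if seen < 3 else second).append(ch)
--         if ch in 'nmN':
--             seen += 1
--     if seen == 6:
--         return ''.join(first).strip('/-'), ''.join(second).strip('/-')
--     return None
-- ===== Notes on version B (the rewrite author's own statement) =====
-- stated objective: alternative
-- what changed: B is a single-pass state machine that routes each character into one of two output buffers (switching after the third marker) while counting markers, instead of A's count-everything pass followed by a second rescan to find a split index and two slice operations.
import Mathlib
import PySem

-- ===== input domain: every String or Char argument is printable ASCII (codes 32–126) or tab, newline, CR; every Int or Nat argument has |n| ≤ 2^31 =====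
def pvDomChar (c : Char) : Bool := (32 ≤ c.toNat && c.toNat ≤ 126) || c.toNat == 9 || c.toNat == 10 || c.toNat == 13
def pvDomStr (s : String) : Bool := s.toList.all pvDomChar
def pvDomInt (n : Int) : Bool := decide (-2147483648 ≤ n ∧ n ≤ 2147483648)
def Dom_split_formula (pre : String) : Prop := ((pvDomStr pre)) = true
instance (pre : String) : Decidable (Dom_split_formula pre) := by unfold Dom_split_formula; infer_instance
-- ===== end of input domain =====

-- B replaces A's count pass + rescan-for-the-split-index + slicing by a single-pass state
-- machine that routes each character into one of two buffers; same value everywhere.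

-- `ch in 'nmN'` for a single character ch (exact: membership of a char in the marker string)
def inAlpha (ch : Char) : Bool := "nmN".toList.contains ch

-- ===== PORT A =====
-- A's second loop: running counter alpha_count2 = c2, running index n, `break` = return n+1
def loopA : List Char → Int → Int → Int
  | [], _, n => n
  | ch :: rest, c2, n =>
    if inAlpha ch then
      if c2 + 1 == 3 then n + 1
      else loopA rest (c2 + 1) (n + 1)
    else loopA rest c2 (n + 1)

def split_formula (pre : String) : Option (String × String) :=
  let alpha_count1 : Int := pre.toList.foldl (fun a ch => if inAlpha ch then a + 1 else a) 0
  if alpha_count1 == 6 then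
    let n := loopA pre.toList 0 0
    some (PySem.Str.stripChars (PySem.Str.slice pre none (some n)) "/-",
          PySem.Str.stripChars (PySem.Str.slice pre (some n) none) "/-")
  else none

-- ===== PORT B =====
-- B's single loop: append ch to `first` while seen < 3 markers, else to `second`;
-- state = (first buffer, second buffer, marker count)
def loopB : List Char → List Char → List Char → Int → List Char × List Char × Int
  | [], f, s, seen => (f, s, seen)
  | ch :: rest, f, s, seen =>
    let fs := if seen < 3 then (f ++ [ch], s) else (f, s ++ [ch])
    loopB rest fs.1 fs.2 (if inAlpha ch then seen + 1 else seen)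

def split_formula_alt (pre : String) : Option (String × String) :=
  let r := loopB pre.toList [] [] 0
  if r.2.2 == 6 then
    some (PySem.Str.stripChars (String.ofList r.1) "/-",
          PySem.Str.stripChars (String.ofList r.2.1) "/-")
  else none

-- ===== PRECONDITION & SPEC =====
def Spec_split_formula (pre : String) (out : Option (String × String)) : Prop := out = split_formula_alt pre
instance (pre : String) (out : Option (String × String)) : Decidable (Spec_split_formula pre out) := by unfold Spec_split_formula; infer_instance

-- ===== CLAIM (what is proved, stated in full; the proofs are below) =====
def Claim_equal_split_formula : Prop := ∀ (pre : String), Dom_split_formula pre → Spec_split_formula pre (split_formula pre)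

-- ===== LEMMAS AND PROOFS =====

-- number of marker characters in a list
def cntM : List Char → Int
  | [] => 0
  | ch :: rest => (if inAlpha ch then 1 else 0) + cntM rest

theorem foldl_cnt (l : List Char) : ∀ (a : Int),
    l.foldl (fun a ch => if inAlpha ch then a + 1 else a) a = a + cntM l := by
  induction l with
  | nil => intro a; simp [cntM]
  | cons ch rest ih =>
    intro a
    by_cases h : inAlpha ch <;> simp [cntM, h, List.foldl_cons, ih] <;> ring

-- index just after the (3 - c2)-th marker (or the length if there are fewer)
def kidx : List Char → Int → Nat
  | [], _ => 0
  | ch :: rest, c2 =>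
    if inAlpha ch then (if c2 + 1 = 3 then 1 else kidx rest (c2 + 1) + 1)
    else kidx rest c2 + 1

theorem loopA_eq_kidx (l : List Char) : ∀ (c2 n : Int),
    loopA l c2 n = n + kidx l c2 := by
  induction l with
  | nil => intro c2 n; simp [loopA, kidx]
  | cons ch rest ih =>
    intro c2 n
    by_cases h : inAlpha ch
    · by_cases h3 : c2 + 1 = 3
      · simp [loopA, kidx, h, h3]
      · simp only [loopA, kidx, h, if_true]
        rw [if_neg (by simpa using h3), if_neg h3, ih]
        push_cast; omega
    · simp [loopA, kidx, h, ih]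
      omega

theorem loopB_ge3 (l : List Char) : ∀ (f s : List Char) (seen : Int), 3 ≤ seen →
    loopB l f s seen = (f, s ++ l, seen + cntM l) := by
  induction l with
  | nil => intro f s seen _; simp [loopB, cntM]
  | cons ch rest ih =>
    intro f s seen h3
    have hn : ¬ seen < 3 := by omega
    by_cases h : inAlpha ch <;>
    · simp only [loopB, hn, if_false, h, if_true, cntM]
      rw [ih _ _ _ (by omega)]
      refine Prod.ext rfl (Prod.ext (by simp) (by simp [h]; try omega))

theorem loopB_lt3 (l : List Char) : ∀ (f s : List Char) (seen : Int),
    0 ≤ seen → seen ≤ 2 →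
    loopB l f s seen = (f ++ l.take (kidx l seen), s ++ l.drop (kidx l seen),
      seen + cntM l) := by
  induction l with
  | nil => intro f s seen _ _; simp [loopB, kidx, cntM]
  | cons ch rest ih =>
    intro f s seen h0 h2
    have hlt : seen < 3 := by omega
    by_cases h : inAlpha ch
    · by_cases h3 : seen + 1 = 3
      · simp only [loopB, hlt, if_true, h, kidx, h3, cntM]
        rw [loopB_ge3 rest _ _ _ (by omega)]
        refine Prod.ext (by simp) (Prod.ext (by simp) (by simp; omega))
      · simp [loopB, hlt, h, kidx, h3, cntM, ih _ _ _ (by omega : (0:Int) ≤ seen + 1) (by omega : seen + 1 ≤ 2)]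
        omega
    · simp [loopB, hlt, h, kidx, cntM, ih _ _ _ h0 h2]

-- ===== VERDICT (by name: the statement is the Claim_ definition above) =====
theorem split_formula_spec : Claim_equal_split_formula := by
  intro pre _
  unfold Spec_split_formula split_formula split_formula_alt
  rw [foldl_cnt pre.toList 0, loopB_lt3 pre.toList [] [] 0 (by omega) (by omega)]
  simp only [List.nil_append, zero_add]
  by_cases h6 : cntM pre.toList = 6
  · have hA : loopA pre.toList 0 0 = ((kidx pre.toList 0 : Nat) : Int) := by
      rw [loopA_eq_kidx]; ring
    have hsl1 : PySem.Str.slice pre none (some (loopA pre.toList 0 0)) =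
        String.ofList (pre.toList.take (kidx pre.toList 0)) := by
      rw [← String.ofList_toList (s := PySem.Str.slice pre none (some (loopA pre.toList 0 0)))]
      rw [hA]
      simp [PySem.Str.toList_slice, PySem.List.slice_to_natCast]
    have hsl2 : PySem.Str.slice pre (some (loopA pre.toList 0 0)) none =
        String.ofList (pre.toList.drop (kidx pre.toList 0)) := by
      rw [← String.ofList_toList (s := PySem.Str.slice pre (some (loopA pre.toList 0 0)) none)]
      rw [hA]
      simp [PySem.Str.toList_slice, PySem.List.slice_from_natCast]
    simp [h6, hsl1, hsl2]
  · simp [h6]
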